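-- pv_equiv track=rewrite | github.com/sdj3261/Algorithm_Exercise | programmers_level1.py | solution2
-- ===== SOURCE A (Python) =====
-- def solution2(answers):
--     pattern1 = [1,2,3,4,5]
--     pattern2 = [2,1,2,3,2,4,2,5]
--     pattern3 = [3,3,1,1,2,2,4,4,5,5]
--     score = [0, 0, 0]
--     result = []
--
--     for idx, answer in enumerate(answers):
--
--         if answer == pattern1[idx%len(pattern1)]:
--             score[0] += 1
--         if answer == pattern2[idx%len(pattern2)]:
--             score[1] += 1
--         if answer == pattern3[idx%len(pattern3)]:
--             score[2] += 1
--
--     for idx, s in enumerate(score):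
--         if s == max(score):
--             result.append(idx+1)
--
--     return result
-- ===== SOURCE B (Python) =====
-- def solution2(answers):
--     # Histogram approach: one counting pass groups answers by (index mod 40, value)
--     # (40 = lcm of the three pattern periods), then each supervisor's score is read
--     # off the histogram in 40 lookups, independent of len(answers).
--     patterns = [[1, 2, 3, 4, 5],
--                 [2, 1, 2, 3, 2, 4, 2, 5],
--                 [3, 3, 1, 1, 2, 2, 4, 4, 5, 5]]
--     freq = {}
--     for idx, a in enumerate(answers):
--         key = (idx % 40, a)
--         freq[key] = freq.get(key, 0) + 1
--     scores = [sum(freq.get((r, p[r % len(p)]), 0) for r in range(40))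
--               for p in patterns]
--     best = max(scores)
--     return [i + 1 for i, s in enumerate(scores) if s == best]
-- ===== Notes on version B (the rewrite author's own statement) =====
-- stated objective: alternative
-- what changed: Replaces A's per-element comparison of each answer against all three patterns by a grouping/histogram algorithm: one pass builds a dict counting answers by (index mod 40, value) (40 = lcm of the pattern periods), each score is then read off the histogram with 40 dict lookups, and winners are selected with max plus a comprehension instead of a second append loop.
import Mathlib
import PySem

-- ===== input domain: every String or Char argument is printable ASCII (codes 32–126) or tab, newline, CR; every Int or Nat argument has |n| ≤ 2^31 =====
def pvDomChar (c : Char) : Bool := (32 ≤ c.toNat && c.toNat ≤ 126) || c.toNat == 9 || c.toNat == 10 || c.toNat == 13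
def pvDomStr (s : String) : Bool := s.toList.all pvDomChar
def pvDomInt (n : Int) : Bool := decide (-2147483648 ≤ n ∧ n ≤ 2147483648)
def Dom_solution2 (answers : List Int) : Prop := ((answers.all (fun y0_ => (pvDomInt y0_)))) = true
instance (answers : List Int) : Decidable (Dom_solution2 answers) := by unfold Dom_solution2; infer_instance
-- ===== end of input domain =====

-- B replaces A's per-element three-way pattern comparison by a grouping algorithm: one pass
-- builds a histogram keyed by (index mod 40, answer) (40 = lcm of the pattern periods), each
-- score is then 40 histogram lookups, and winners come from max + a comprehension: alternative.

-- ===== PORT A =====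
-- loop body of A's first for-loop (the three `if answer == pattern_i[idx % len]: score[i] += 1` updates)
def aStep (s : Int × Int × Int) (ia : Int × Int) : Int × Int × Int :=
  let s := if ia.2 = PySem.List.pyGetD [1, 2, 3, 4, 5] (PySem.Int.mod ia.1 5) 0 then
             (s.1 + 1, s.2.1, s.2.2) else s
  let s := if ia.2 = PySem.List.pyGetD [2, 1, 2, 3, 2, 4, 2, 5] (PySem.Int.mod ia.1 8) 0 then
             (s.1, s.2.1 + 1, s.2.2) else s
  if ia.2 = PySem.List.pyGetD [3, 3, 1, 1, 2, 2, 4, 4, 5, 5] (PySem.Int.mod ia.1 10) 0 then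
    (s.1, s.2.1, s.2.2 + 1) else s

def solution2 (answers : List Int) : List Int :=
  -- score = [0,0,0] kept as a triple of mutable counters
  let score : Int × Int × Int := (PySem.List.enumerate answers 0).foldl aStep (0, 0, 0)
  let scoreList : List Int := [score.1, score.2.1, score.2.2]
  -- second for-loop: result.append(idx+1) when s == max(score)
  (PySem.List.enumerate scoreList 0).foldl
    (fun (result : List Int) (is : Int × Int) =>
      if is.2 = (PySem.List.max? scoreList (fun x => x)).getD 0 then result ++ [is.1 + 1]
      else result)
    []

-- ===== PORT B =====
-- the counting loop: freq[(idx % 40, a)] = freq.get((idx % 40, a), 0) + 1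
def bFreq (answers : List Int) : PySem.Dict (Int × Int) Int :=
  (PySem.List.enumerate answers 0).foldl
    (fun d ia =>
      PySem.Dict.insert d (PySem.Int.mod ia.1 40, ia.2)
        (PySem.Dict.getD d (PySem.Int.mod ia.1 40, ia.2) 0 + 1))
    PySem.Dict.empty

-- sum(freq.get((r, p[r % len(p)]), 0) for r in range(40))
def bScore (freq : PySem.Dict (Int × Int) Int) (p : List Int) : Int :=
  ((PySem.List.pyRange 0 40 1).map (fun r =>
    PySem.Dict.getD freq (r, PySem.List.pyGetD p (PySem.Int.mod r (p.length : Int)) 0) 0)).sum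

def solution2_alt (answers : List Int) : List Int :=
  let patterns : List (List Int) :=
    [[1, 2, 3, 4, 5], [2, 1, 2, 3, 2, 4, 2, 5], [3, 3, 1, 1, 2, 2, 4, 4, 5, 5]]
  let freq := bFreq answers
  let scores := patterns.map (bScore freq)
  let best := (PySem.List.max? scores (fun x => x)).getD 0
  (PySem.List.enumerate scores 0).filterMap
    (fun is => if is.2 = best then some (is.1 + 1) else none)

-- ===== PRECONDITION & SPEC =====
def Spec_solution2 (answers : List Int) (out : List Int) : Prop := out = solution2_alt answers
instance (answers : List Int) (out : List Int) : Decidable (Spec_solution2 answers out) := by unfold Spec_solution2; infer_instance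

-- ===== CLAIM (what is proved, stated in full; the proofs are below) =====
def Claim_equal_solution2 : Prop := ∀ (answers : List Int), Dom_solution2 answers → Spec_solution2 answers (solution2 answers)

-- ===== LEMMAS AND PROOFS =====

-- reference count: matches of answers against pattern p, starting at position k
def cntFrom (p : List Int) (k : Nat) : List Int → Int
  | [] => 0
  | a :: rest => (if a = p.getD (k % p.length) 0 then 1 else 0) + cntFrom p (k + 1) rest

-- common normal form of both selection phases
def winners (c1 c2 c3 : Int) : List Int :=
  (if c1 = max (max c1 c2) c3 then [1] else []) ++
  (if c2 = max (max c1 c2) c3 then [2] else []) ++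
  (if c3 = max (max c1 c2) c3 then [3] else [])

-- the indicator of one supervisor's hit at an enumerated element
def ind (p : List Int) (mInt : Int) (ia : Int × Int) : Int :=
  if ia.2 = PySem.List.pyGetD p (PySem.Int.mod ia.1 mInt) 0 then 1 else 0

-- summing an indicator over the enumeration is the reference count
theorem cnt_sum (p : List Int) (mInt : Int) (hm : mInt = (p.length : Int)) :
    ∀ (ans : List Int) (k : Nat),
    ((PySem.List.enumerate ans (k : Int)).map (ind p mInt)).sum = cntFrom p k ans := by
  subst hm
  intro ans
  induction ans with
  | nil => intro k; simp [PySem.List.enumerate_nil, cntFrom]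
  | cons a rest ih =>
    intro k
    rw [PySem.List.enumerate_cons]
    have hcast : (k : Int) + 1 = ((k + 1 : Nat) : Int) := by push_cast; ring
    simp only [List.map_cons, List.sum_cons, hcast, ih, cntFrom, ind,
      PySem.Int.mod_natCast, PySem.List.pyGetD_natCast]

-- A's combined fold is three independent indicator sums
theorem aFold_eq0 (answers : List Int) :
    (PySem.List.enumerate answers 0).foldl aStep (0, 0, 0)
    = (cntFrom [1, 2, 3, 4, 5] 0 answers,
       cntFrom [2, 1, 2, 3, 2, 4, 2, 5] 0 answers,
       cntFrom [3, 3, 1, 1, 2, 2, 4, 4, 5, 5] 0 answers) := by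
  have hstep : aStep = fun (s : Int × Int × Int) (ia : Int × Int) =>
      (s.1 + ind [1, 2, 3, 4, 5] 5 ia,
       s.2.1 + ind [2, 1, 2, 3, 2, 4, 2, 5] 8 ia,
       s.2.2 + ind [3, 3, 1, 1, 2, 2, 4, 4, 5, 5] 10 ia) := by
    funext s ia
    obtain ⟨s1, s2, s3⟩ := s
    simp only [aStep, ind]
    split_ifs <;> simp
  rw [hstep,
      PySem.List.foldl_prod_mk (f := fun c ia => c + ind [1, 2, 3, 4, 5] 5 ia)
        (g := fun (s : Int × Int) ia => (s.1 + ind [2, 1, 2, 3, 2, 4, 2, 5] 8 ia,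
                                          s.2 + ind [3, 3, 1, 1, 2, 2, 4, 4, 5, 5] 10 ia)),
      PySem.List.foldl_prod_mk (f := fun c ia => c + ind [2, 1, 2, 3, 2, 4, 2, 5] 8 ia)
        (g := fun c ia => c + ind [3, 3, 1, 1, 2, 2, 4, 4, 5, 5] 10 ia),
      PySem.List.foldl_add, PySem.List.foldl_add, PySem.List.foldl_add]
  have h1 := cnt_sum [1, 2, 3, 4, 5] 5 (by norm_num) answers 0
  have h2 := cnt_sum [2, 1, 2, 3, 2, 4, 2, 5] 8 (by norm_num) answers 0
  have h3 := cnt_sum [3, 3, 1, 1, 2, 2, 4, 4, 5, 5] 10 (by norm_num) answers 0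
  simp only [Nat.cast_zero] at h1 h2 h3
  rw [h1, h2, h3]
  simp only [zero_add]

-- an indicator term is nonzero only at r = x.1
theorem ind_sum_zero (v : Int → Int) (x : Int × Int) :
    ∀ R : List Int, x.1 ∉ R →
    (R.map (fun r => if x = (r, v r) then (1 : Int) else 0)).sum = 0 := by
  intro R
  induction R with
  | nil => intro _; simp
  | cons r R ih =>
    intro h
    have hr : x.1 ≠ r := fun he => h (he ▸ List.mem_cons_self)
    have hR : x.1 ∉ R := fun hm => h (List.mem_cons_of_mem _ hm)
    simp only [List.map_cons, List.sum_cons, ih hR]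
    rw [if_neg (fun he => hr (congrArg Prod.fst he)), add_zero]

-- summing the indicator over a duplicate-free index list containing x.1
theorem ind_sum (v : Int → Int) (x : Int × Int) :
    ∀ R : List Int, R.Nodup → x.1 ∈ R →
    (R.map (fun r => if x = (r, v r) then (1 : Int) else 0)).sum
      = if x.2 = v x.1 then 1 else 0 := by
  intro R
  induction R with
  | nil => intro _ h; simp at h
  | cons r R ih =>
    intro hnd hmem
    simp only [List.map_cons, List.sum_cons]
    by_cases hr : x.1 = r
    · subst hr
      rw [ind_sum_zero v x R ((List.nodup_cons.mp hnd).1), add_zero]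
      have hiff : (x = (x.1, v x.1)) ↔ (x.2 = v x.1) := by
        constructor
        · intro h; exact congrArg Prod.snd h
        · intro h; exact Prod.ext rfl h
      simp only [eq_iff_iff.mpr hiff]
    · rw [if_neg (fun he => hr (congrArg Prod.fst he)), zero_add]
      exact ih (List.nodup_cons.mp hnd).2 (List.mem_of_ne_of_mem hr hmem)

-- B's histogram read-off over range(40) computes the reference count
theorem count_sum (p : List Int) (hd : p.length ∣ 40) :
    ∀ (ans : List Int) (k : Nat),
    ((PySem.List.pyRange 0 40 1).map (fun r =>
      ((((PySem.List.enumerate ans (k : Int)).map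
          (fun ia => (PySem.Int.mod ia.1 40, ia.2))).count
        (r, PySem.List.pyGetD p (PySem.Int.mod r (p.length : Int)) 0) : Nat) : Int))).sum
    = cntFrom p k ans := by
  intro ans
  induction ans with
  | nil =>
    intro k
    simp [PySem.List.enumerate_nil, cntFrom]
  | cons a rest ih =>
    intro k
    rw [PySem.List.enumerate_cons]
    have hcast : (k : Int) + 1 = ((k + 1 : Nat) : Int) := by push_cast; ring
    have hkey : (PySem.Int.mod (k : Int) 40, a) = (((k % 40 : Nat) : Int), a) := by
      rw [show (40 : Int) = ((40 : Nat) : Int) from rfl, PySem.Int.mod_natCast]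
    simp only [List.map_cons, List.count_cons, beq_iff_eq]
    simp only [hkey]
    simp only [Nat.cast_add, Nat.cast_ite, Nat.cast_one, Nat.cast_zero]
    rw [PySem.List.sum_map_add_int]
    simp only [hcast]
    rw [ih (k + 1)]
    have hindic := ind_sum (fun r => PySem.List.pyGetD p (PySem.Int.mod r (p.length : Int)) 0)
      (((k % 40 : Nat) : Int), a) (PySem.List.pyRange 0 40 1)
      (PySem.List.nodup_pyRange_one 0 40)
      (by
        rw [PySem.List.mem_pyRange_one]
        refine ⟨Int.natCast_nonneg _, ?_⟩
        show ((k % 40 : Nat) : Int) < 40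
        exact_mod_cast Nat.mod_lt k (by norm_num : (0:Nat) < 40))
    simp only at hindic
    rw [hindic]
    have hval : PySem.List.pyGetD p (PySem.Int.mod ((k % 40 : Nat) : Int) (p.length : Int)) 0
        = p.getD (k % p.length) 0 := by
      rw [show (p.length : Int) = ((p.length : Nat) : Int) from rfl, PySem.Int.mod_natCast,
          PySem.List.pyGetD_natCast, Nat.mod_mod_of_dvd k hd]
    simp only [hval]
    conv_rhs => rw [cntFrom]
    exact add_comm _ _

-- B's per-pattern score equals the reference count
theorem bScore_eq (p : List Int) (hd : p.length ∣ 40)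
    (answers : List Int) :
    bScore (bFreq answers) p = cntFrom p 0 answers := by
  have hfreq : bFreq answers
      = ((PySem.List.enumerate answers 0).map (fun ia => (PySem.Int.mod ia.1 40, ia.2))).foldl
          (fun d x => PySem.Dict.insert d x (PySem.Dict.getD d x 0 + 1)) PySem.Dict.empty := by
    rw [List.foldl_map]; rfl
  unfold bScore
  rw [hfreq]
  have hget : ∀ key, PySem.Dict.getD
      (((PySem.List.enumerate answers 0).map (fun ia => (PySem.Int.mod ia.1 40, ia.2))).foldl
        (fun d x => PySem.Dict.insert d x (PySem.Dict.getD d x 0 + 1)) PySem.Dict.empty)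
      key 0
      = (((PySem.List.enumerate answers 0).map (fun ia => (PySem.Int.mod ia.1 40, ia.2))).count key : Int) := by
    intro key
    rw [PySem.Dict.getD_foldl_insert_add_one]
    simp [PySem.Dict.getD, PySem.Dict.get?, PySem.Dict.empty]
  simp only [hget]
  have := count_sum p hd answers 0
  simpa using this

-- A's selection loop reaches the normal form
theorem aSelect_eq (c1 c2 c3 : Int) :
    (PySem.List.enumerate [c1, c2, c3] 0).foldl
      (fun (result : List Int) (is : Int × Int) =>
        if is.2 = (PySem.List.max? [c1, c2, c3] (fun x => x)).getD 0 then result ++ [is.1 + 1]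
        else result)
      []
    = winners c1 c2 c3 := by
  simp only [PySem.List.enumerate_cons, PySem.List.enumerate_nil, PySem.List.max?_id_cons,
    List.foldl_cons, List.foldl_nil, Option.getD_some, winners]
  split_ifs <;> simp

-- B's comprehension reaches the normal form
theorem bSelect_eq (c1 c2 c3 : Int) :
    (PySem.List.enumerate [c1, c2, c3] 0).filterMap
      (fun is => if is.2 = (PySem.List.max? [c1, c2, c3] (fun x => x)).getD 0
                 then some (is.1 + 1) else none)
    = winners c1 c2 c3 := by
  simp only [PySem.List.enumerate_cons, PySem.List.enumerate_nil, PySem.List.max?_id_cons,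
    List.filterMap_cons, List.filterMap_nil, List.foldl_cons, List.foldl_nil,
    Option.getD_some, winners]
  split_ifs <;> simp

-- ===== VERDICT (by name: the statement is the Claim_ definition above) =====
theorem solution2_spec : Claim_equal_solution2 := by
  intro answers _
  show solution2 answers = solution2_alt answers
  rw [solution2, solution2_alt]
  simp only [aFold_eq0, List.map_cons, List.map_nil,
    bScore_eq [1,2,3,4,5] (by decide),
    bScore_eq [2,1,2,3,2,4,2,5] (by decide),
    bScore_eq [3,3,1,1,2,2,4,4,5,5] (by decide)]
  rw [aSelect_eq, bSelect_eq]
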